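-- pv_equiv track=rewrite | github.com/dorkem/Algorithm | 백준/Silver/2108. 통계학/통계학.py | modefinder
-- ===== SOURCE A (Python) =====
-- from collections import Counter
--
-- def modefinder(numbers):
--     c = Counter(numbers)
--     order = c.most_common()
--     maximum = order[0][1]
--
--     modes = []
--     for num in order:
--         if num[1] == maximum:
--             modes.append(num[0])
--
--     if len(modes) > 1:
--         return sorted(modes)[1]
--     else:
--         return modes[0]
-- ===== SOURCE B (Python) =====
-- def modefinder(numbers):
--     s = sorted(numbers)
--     cur = None
--     run = 0
--     best = 0
--     modes = []
--     for v in s: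
--         run = run + 1 if v == cur else 1
--         cur = v
--         if run > best:
--             best = run
--             modes = [v]
--         elif run == best:
--             modes.append(v)
--     return modes[1] if len(modes) > 1 else modes[0]
-- ===== Notes on version B (the rewrite author's own statement) =====
-- stated objective: alternative
-- what changed: Replaces Counter/most_common hashing plus a final sort of the modes by a single run-length pass over sorted(numbers) that maintains the best run length and collects the mode values already in ascending order.
import Mathlib
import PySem

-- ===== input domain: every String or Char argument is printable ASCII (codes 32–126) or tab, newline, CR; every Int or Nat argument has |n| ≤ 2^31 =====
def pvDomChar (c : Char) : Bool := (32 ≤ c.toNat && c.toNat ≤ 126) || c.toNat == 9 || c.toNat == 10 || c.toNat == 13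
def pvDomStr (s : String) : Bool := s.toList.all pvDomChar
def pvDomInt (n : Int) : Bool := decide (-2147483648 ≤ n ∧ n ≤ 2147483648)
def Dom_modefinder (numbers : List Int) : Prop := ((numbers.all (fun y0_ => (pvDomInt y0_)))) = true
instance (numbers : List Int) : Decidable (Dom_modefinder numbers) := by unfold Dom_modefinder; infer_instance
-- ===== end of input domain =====

-- B replaces Counter/most_common by one run-length pass over sorted(numbers) collecting modes in ascending order (alternative decomposition, same asymptotic cost); return-value equivalence on nonempty lists.


-- ===== PORT A =====
-- c = Counter(numbers); order = c.most_common()  (sorted by count, descending, stable)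
def modefinder (numbers : List Int) : Int :=
  let c := PySem.Dict.counter numbers
  let order := PySem.List.sorted c.items (fun p => p.2) true
  match PySem.List.pyGet? order 0 with      -- order[0][1]; none = IndexError, excluded by Pre_
  | none => 0
  | some first =>
    let maximum := first.2
    let modes := order.foldl (fun acc num => if num.2 == maximum then acc ++ [num.1] else acc) []
    if modes.length > 1 then
      (PySem.List.pyGet? (PySem.List.sorted modes (fun x => x) false) 1).getD 0
    else
      (PySem.List.pyGet? modes 0).getD 0    -- none = IndexError, excluded by Pre_ (unreachable here)

-- ===== PORT B =====
-- the loop body of Source B: state (cur, run, best, modes)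
def pvStepB (st : Option Int × Int × Int × List Int) (v : Int) : Option Int × Int × Int × List Int :=
  let run := if some v == st.1 then st.2.1 + 1 else 1
  if run > st.2.2.1 then (some v, run, run, [v])
  else if run == st.2.2.1 then (some v, run, st.2.2.1, st.2.2.2 ++ [v])
  else (some v, run, st.2.2.1, st.2.2.2)

def modefinder_alt (numbers : List Int) : Int :=
  let s := PySem.List.sorted numbers (fun x => x) false
  let st := s.foldl pvStepB (none, 0, 0, [])
  let modes := st.2.2.2
  if modes.length > 1 then (PySem.List.pyGet? modes 1).getD 0
  else (PySem.List.pyGet? modes 0).getD 0   -- none = IndexError on empty input, excluded by Pre_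

-- ===== PRECONDITION & SPEC =====
-- Pre_ excludes only the empty list, on which A raises IndexError (order[0]) — and B raises IndexError too (modes[0]).
def Pre_modefinder (numbers : List Int) : Prop := numbers ≠ []
instance (numbers : List Int) : Decidable (Pre_modefinder numbers) := by unfold Pre_modefinder; infer_instance
def pvWitness_modefinder : List Int := [2, 1, 2, 3, 1]

def Spec_modefinder (numbers : List Int) (out : Int) : Prop := out = modefinder_alt numbers
instance (numbers : List Int) (out : Int) : Decidable (Spec_modefinder numbers out) := by unfold Spec_modefinder; infer_instance

-- ===== CLAIM (what is proved, stated in full; the proofs are below) =====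
def Claim_equal_modefinder : Prop := ∀ (numbers : List Int), Dom_modefinder numbers → Pre_modefinder numbers → Spec_modefinder numbers (modefinder numbers)

-- ===== LEMMAS AND PROOFS =====

def PvIsMax (xs : List Int) (m : Int) : Prop :=
  (∃ k ∈ xs, (xs.count k : Int) = m) ∧ ∀ k ∈ xs, (xs.count k : Int) ≤ m

def pvModesC (xs : List Int) (m : Int) : List Int :=
  (PySem.List.sorted (PySem.Set.ofList xs) (fun x => x) false).filter (fun v => ((xs.count v : Int) == m))

def pvPick (l : List Int) : Int :=
  if l.length > 1 then (PySem.List.pyGet? l 1).getD 0 else (PySem.List.pyGet? l 0).getD 0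


lemma lemA (numbers : List Int) (hne : numbers ≠ []) :
    ∃ m, PvIsMax numbers m ∧ modefinder numbers = pvPick (pvModesC numbers m) := by
  have hitems := PySem.Dict.items_counter numbers
  have hSne : PySem.Set.ofList numbers ≠ [] := by
    rcases numbers with _|⟨a,t⟩
    · exact absurd rfl hne
    · intro h
      have : a ∈ PySem.Set.ofList (a::t) := (PySem.Set.mem_ofList _ _).2 (by simp)
      rw [h] at this; simp at this
  have hIne : (PySem.Dict.counter numbers).items ≠ [] := by
    rw [hitems]; simpa using hSne
  have horder_ne : PySem.List.sorted (PySem.Dict.counter numbers).items (fun p => p.2) true ≠ [] := by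
    simpa [PySem.List.sorted_eq_nil_iff] using hIne
  obtain ⟨h0, t, hordeq⟩ := List.exists_cons_of_ne_nil horder_ne
  -- h0 ∈ items
  have h0mem : h0 ∈ (PySem.Dict.counter numbers).items := by
    have : h0 ∈ PySem.List.sorted (PySem.Dict.counter numbers).items (fun p => p.2) true := by
      rw [hordeq]; simp
    exact (PySem.List.mem_sorted _ _ _ _).1 this
  obtain ⟨k0, hk0S, hk0eq⟩ := by
    rw [hitems] at h0mem; exact List.mem_map.1 h0mem
  have hmax : PvIsMax numbers h0.2 := by
    constructor
    · exact ⟨k0, (PySem.Set.mem_ofList _ _).1 hk0S, by simpa using congrArg Prod.snd hk0eq⟩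
    · intro k hk
      have hkS : (k, ((numbers.count k : Nat) : Int)) ∈ (PySem.Dict.counter numbers).items := by
        rw [hitems]; exact List.mem_map.2 ⟨k, (PySem.Set.mem_ofList _ _).2 hk, rfl⟩
      exact PySem.List.key_head_sorted_rev_ge _ (fun p => p.2) hordeq _ hkS
  refine ⟨h0.2, hmax, ?_⟩
  -- unfold A
  have hget : PySem.List.pyGet? (PySem.List.sorted (PySem.Dict.counter numbers).items (fun p => p.2) true) 0 = some h0 := by
    rw [hordeq]; simp [PySem.List.pyGet?, PySem.List.pyIdx?]
  have hmodes : (PySem.List.sorted (PySem.Dict.counter numbers).items (fun p => p.2) true).foldl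
      (fun acc num => if num.2 == h0.2 then acc ++ [num.1] else acc) []
      = ((PySem.List.sorted (PySem.Dict.counter numbers).items (fun p => p.2) true).filter (fun num => num.2 == h0.2)).map (fun num => num.1) := by
    simpa using PySem.List.foldl_append_if (fun num : Int × Int => num.2 == h0.2) (fun num => num.1)
      (PySem.List.sorted (PySem.Dict.counter numbers).items (fun p => p.2) true) []
  -- perm chain
  have hperm1 : (PySem.List.sorted (PySem.Dict.counter numbers).items (fun p => p.2) true).Perm
      (PySem.Dict.counter numbers).items := PySem.List.sorted_perm _ _ _
  have hpermM : (((PySem.List.sorted (PySem.Dict.counter numbers).items (fun p => p.2) true).filter (fun num => num.2 == h0.2)).map (fun num => num.1)).Perm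
      ((PySem.Set.ofList numbers).filter (fun v => ((numbers.count v : Int) == h0.2))) := by
    have h2 := (hperm1.filter (fun num => num.2 == h0.2)).map (fun num : Int × Int => num.1)
    refine h2.trans ?_
    rw [hitems, List.filter_map, List.map_map]
    simp [Function.comp_def]
  have hpermC : (pvModesC numbers h0.2).Perm ((PySem.Set.ofList numbers).filter (fun v => ((numbers.count v : Int) == h0.2))) :=
    (PySem.List.sorted_perm _ _ _).filter _
  have hperm : (pvModesC numbers h0.2).Perm
      (((PySem.List.sorted (PySem.Dict.counter numbers).items (fun p => p.2) true).filter (fun num => num.2 == h0.2)).map (fun num => num.1)) :=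
    hpermC.trans hpermM.symm
  have hpw : (pvModesC numbers h0.2).Pairwise (fun a b => a < b) :=
    (PySem.List.sorted_ofList_pairwise_lt numbers).filter _
  have hlen := hperm.length_eq
  -- A's modes nonempty
  have hmne : h0 ∈ (PySem.List.sorted (PySem.Dict.counter numbers).items (fun p => p.2) true).filter (fun num => num.2 == h0.2) := by
    rw [hordeq, List.filter_cons]; simp
  unfold modefinder
  simp only [hget]
  rw [hmodes]
  by_cases hl : 1 < (((PySem.List.sorted (PySem.Dict.counter numbers).items (fun p => p.2) true).filter (fun num => num.2 == h0.2)).map (fun num => num.1)).length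
  · simp only [gt_iff_lt, if_pos hl]
    have hsorted : PySem.List.sorted (((PySem.List.sorted (PySem.Dict.counter numbers).items (fun p => p.2) true).filter (fun num => num.2 == h0.2)).map (fun num => num.1)) (fun x => x) false = pvModesC numbers h0.2 :=
      PySem.List.sorted_eq_of_perm_of_pairwise_lt _ _ _ hperm hpw
    rw [hsorted, pvPick]; rw [if_pos (by omega : 1 < (pvModesC numbers h0.2).length)]
  · simp only [gt_iff_lt, if_neg hl]
    have hge1 : 1 ≤ (((PySem.List.sorted (PySem.Dict.counter numbers).items (fun p => p.2) true).filter (fun num => num.2 == h0.2)).map (fun num => num.1)).length := by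
      simp only [List.length_map]
      exact List.length_pos_of_mem hmne
    have hl1 : (((PySem.List.sorted (PySem.Dict.counter numbers).items (fun p => p.2) true).filter (fun num => num.2 == h0.2)).map (fun num => num.1)).length = 1 := by omega
    obtain ⟨x, hx⟩ := List.length_eq_one_iff.1 hl1
    have hcx : pvModesC numbers h0.2 = [x] := List.perm_singleton.1 (hx ▸ hperm)
    rw [hx, hcx, pvPick]
    simp [PySem.List.pyGet?, PySem.List.pyIdx?]

def PvInv (p : List Int) (st : Option Int × Int × Int × List Int) : Prop :=
  (p = [] ∧ st = (none, 0, 0, [])) ∨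
  (∃ L, L ∈ p ∧ (∀ x ∈ p, x ≤ L) ∧ st.1 = some L ∧ st.2.1 = (p.count L : Int) ∧
    PvIsMax p st.2.2.1 ∧ st.2.2.2 = pvModesC p st.2.2.1)

-- a maximal member of a strictly increasing list is its last element
lemma pv_max_last {v : Int} : ∀ {l : List Int}, l.Pairwise (· < ·) → v ∈ l → (∀ x ∈ l, x ≤ v) →
    ∃ l₀, l = l₀ ++ [v] ∧ ∀ x ∈ l₀, x < v := by
  intro l
  induction l with
  | nil => intro _ hv; simp at hv
  | cons a t ih =>
    intro hpw hv hle
    rcases t with _|⟨b, t'⟩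
    · simp at hv; exact ⟨[], by simp [hv], by simp⟩
    · have hat : ∀ x ∈ b :: t', a < x := (List.pairwise_cons.1 hpw).1
      have hvt : v ∈ b :: t' := by
        rcases List.mem_cons.1 hv with h | h
        · exfalso
          have hb := hat b (by simp)
          have := hle b (by simp)
          omega
        · exact h
      obtain ⟨t₀, ht₀, hlt⟩ := ih (List.pairwise_cons.1 hpw).2 hvt (fun x hx => hle x (List.mem_cons_of_mem a hx))
      refine ⟨a :: t₀, by simp [ht₀], ?_⟩
      intro x hx
      rcases List.mem_cons.1 hx with h | h
      · subst h; exact hat v hvt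
      · exact hlt x h

lemma pv_ofList_append_mem {p : List Int} {v : Int} (h : v ∈ p) :
    PySem.Set.ofList (p ++ [v]) = PySem.Set.ofList p := by
  have : PySem.Set.ofList (p ++ [v]) = PySem.Set.add (PySem.Set.ofList p) v := by
    simp [PySem.Set.ofList_eq_foldl]
  rw [this]
  have hc : (PySem.Set.ofList p).contains v = true :=
    (PySem.Set.contains_iff _ _).2 ((PySem.Set.mem_ofList _ _).2 h)
  show (if (PySem.Set.ofList p).contains v then PySem.Set.ofList p else PySem.Set.ofList p ++ [v]) = _
  rw [hc]; rfl

lemma pv_ofList_append_not_mem {p : List Int} {v : Int} (h : v ∉ p) :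
    PySem.Set.ofList (p ++ [v]) = PySem.Set.ofList p ++ [v] := by
  have : PySem.Set.ofList (p ++ [v]) = PySem.Set.add (PySem.Set.ofList p) v := by
    simp [PySem.Set.ofList_eq_foldl]
  rw [this]
  have hc : (PySem.Set.ofList p).contains v = false := by
    by_contra hcc
    exact h ((PySem.Set.mem_ofList _ _).1 ((PySem.Set.contains_iff _ _).1 (by simpa using hcc)))
  show (if (PySem.Set.ofList p).contains v then PySem.Set.ofList p else PySem.Set.ofList p ++ [v]) = _
  rw [hc]; rfl

lemma pv_cnt_self (p : List Int) (v : Int) : (((p ++ [v]).count v : Nat) : Int) = (p.count v : Int) + 1 := by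
  simp [List.count_append]

lemma pv_cnt_ne (p : List Int) (v w : Int) (h : w ≠ v) : (p ++ [v]).count w = p.count w := by
  have : [v].count w = 0 := List.count_eq_zero.2 (by simp [h])
  simp [List.count_append, this]

lemma pv_isMax_app (p : List Int) (v b : Int)
    (hw : ∃ k ∈ p ++ [v], (((p ++ [v]).count k : Nat) : Int) = b)
    (hv : (((p ++ [v]).count v : Nat) : Int) ≤ b)
    (hp : ∀ k ∈ p, k ≠ v → ((p.count k : Nat) : Int) ≤ b) : PvIsMax (p ++ [v]) b := by
  refine ⟨hw, ?_⟩
  intro k hk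
  by_cases hkv : k = v
  · subst hkv; exact hv
  · rw [pv_cnt_ne _ _ _ hkv]
    have hkp : k ∈ p := by
      rcases List.mem_append.1 hk with h | h
      · exact h
      · simp at h; exact absurd h hkv
    exact hp k hkp hkv

lemma pv_step (p : List Int) (v : Int) (st : Option Int × Int × Int × List Int)
    (hle : ∀ x ∈ p, x ≤ v) (hinv : PvInv p st) : PvInv (p ++ [v]) (pvStepB st v) := by
  obtain ⟨cur, r, b, modes⟩ := st
  rcases hinv with ⟨hp, hst⟩ | ⟨L, hLmem, hLmax, hcur, hrun, hbmax, hmodes⟩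
  · -- p = []
    subst hp
    obtain ⟨h1, h2, h3, h4⟩ : cur = none ∧ r = 0 ∧ b = 0 ∧ modes = [] := by
      simpa [Prod.ext_iff] using hst
    subst h1; subst h2; subst h3; subst h4
    right
    refine ⟨v, by simp, by simp, ?_, ?_, ?_, ?_⟩ <;>
      simp [pvStepB, PvIsMax, pvModesC, PySem.Set.ofList_eq_foldl, PySem.Set.add,
        PySem.List.sorted, PySem.List.insertBy]
  · -- p ≠ []
    simp only at hcur hrun hbmax hmodes
    subst hcur
    have hb1 : 1 ≤ b := by
      obtain ⟨⟨k, hk, hkb⟩, _⟩ := hbmax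
      have : 1 ≤ p.count k := List.count_pos_iff.2 hk
      omega
    have hSsub : ∀ x ∈ PySem.List.sorted (PySem.Set.ofList p) (fun x => x) false, x ∈ p := by
      intro x hx
      exact (PySem.Set.mem_ofList _ _).1 ((PySem.List.mem_sorted _ _ _ _).1 hx)
    have hle' : ∀ x ∈ p ++ [v], x ≤ v := by
      intro x hx
      rcases List.mem_append.1 hx with h | h
      · exact hle x h
      · simp at h; omega
    by_cases hvL : v = L
    · -- continuing the current run
      subst hvL
      have hSmax : ∃ S₀, PySem.List.sorted (PySem.Set.ofList p) (fun x => x) false = S₀ ++ [v] ∧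
          ∀ x ∈ S₀, x < v := by
        refine pv_max_last (PySem.List.sorted_ofList_pairwise_lt p) ?_ (fun x hx => hLmax x (hSsub x hx))
        exact (PySem.List.mem_sorted _ _ _ _).2 ((PySem.Set.mem_ofList _ _).2 hLmem)
      obtain ⟨S₀, hS₀, hS₀lt⟩ := hSmax
      have hS₀sub : ∀ x ∈ S₀, x ∈ p := fun x hx => hSsub x (by rw [hS₀]; exact List.mem_append_left _ hx)
      have hS' : PySem.List.sorted (PySem.Set.ofList (p ++ [v])) (fun x => x) false = S₀ ++ [v] := by
        rw [pv_ofList_append_mem hLmem, hS₀]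
      have hcv : (((p ++ [v]).count v : Nat) : Int) = r + 1 := by rw [pv_cnt_self, ← hrun]
      have hfiltS₀ : ∀ c : Int, S₀.filter (fun w => (((p ++ [v]).count w : Nat) : Int) == c)
          = S₀.filter (fun w => ((p.count w : Nat) : Int) == c) := by
        intro c
        apply List.filter_congr
        intro x hx
        have hxv : x ≠ v := by have := hS₀lt x hx; omega
        rw [pv_cnt_ne p v x hxv]
      have hmodesC : ∀ c : Int, pvModesC (p ++ [v]) c
          = S₀.filter (fun w => ((p.count w : Nat) : Int) == c)
            ++ (if ((((p ++ [v]).count v : Nat) : Int) == c) then [v] else []) := by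
        intro c
        rw [pvModesC, hS', List.filter_append, hfiltS₀, List.filter_singleton]
        simp [Bool.cond_eq_ite]
      have hmodesOld : modes = S₀.filter (fun w => ((p.count w : Nat) : Int) == b)
            ++ (if (((p.count v : Nat) : Int) == b) then [v] else []) := by
        rw [hmodes, pvModesC, hS₀, List.filter_append, List.filter_singleton]
        simp [Bool.cond_eq_ite]
      simp only [pvStepB, beq_self_eq_true, if_true]
      split_ifs with h1 h2
      · -- new strict maximum r+1
        right
        dsimp only
        refine ⟨v, by simp, hle', rfl, hcv.symm, ?_, ?_⟩
        · apply pv_isMax_app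
          · exact ⟨v, by simp, hcv⟩
          · omega
          · intro k hk _
            have := hbmax.2 k hk
            omega
        · rw [hmodesC (r + 1)]
          have hnil : S₀.filter (fun w => ((p.count w : Nat) : Int) == r + 1) = [] := by
            apply List.filter_eq_nil_iff.2
            intro x hx
            have := hbmax.2 x (hS₀sub x hx)
            simp only [beq_iff_eq]
            omega
          have hA : ((((p ++ [v]).count v : Nat) : Int) == r + 1) = true := by
            simp only [beq_iff_eq]; omega
          rw [hnil, hA]
          simp
      · -- r+1 ties the maximum
        have hb : r + 1 = b := by simpa using h2
        obtain ⟨⟨k, hk, hkb⟩, hbd⟩ := hbmax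
        have hkv : k ≠ v := by intro h; subst h; omega
        right
        dsimp only
        refine ⟨v, by simp, hle', rfl, hcv.symm, ?_, ?_⟩
        · apply pv_isMax_app
          · exact ⟨k, List.mem_append_left _ hk, by rw [pv_cnt_ne p v k hkv]; exact hkb⟩
          · omega
          · exact fun k' hk' _ => hbd k' hk'
        · have hA : ((((p ++ [v]).count v : Nat) : Int) == b) = true := by
            simp only [beq_iff_eq]; omega
          have hB : (((p.count v : Nat) : Int) == b) = false := by
            simp only [beq_eq_false_iff_ne]; omega
          rw [hmodesC b, hmodesOld, hA, hB]
          simp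
      · -- run below the maximum
        have hblt : r + 1 < b := by
          have : r + 1 ≠ b := by simpa using h2
          omega
        obtain ⟨⟨k, hk, hkb⟩, hbd⟩ := hbmax
        have hkv : k ≠ v := by intro h; subst h; omega
        right
        dsimp only
        refine ⟨v, by simp, hle', rfl, hcv.symm, ?_, ?_⟩
        · apply pv_isMax_app
          · exact ⟨k, List.mem_append_left _ hk, by rw [pv_cnt_ne p v k hkv]; exact hkb⟩
          · omega
          · exact fun k' hk' _ => hbd k' hk'
        · have hA : ((((p ++ [v]).count v : Nat) : Int) == b) = false := by
            simp only [beq_eq_false_iff_ne]; omega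
          have hB : (((p.count v : Nat) : Int) == b) = false := by
            simp only [beq_eq_false_iff_ne]; omega
          rw [hmodesC b, hmodesOld, hA, hB]
    · -- a new, strictly larger value v
      have hvp : v ∉ p := by
        intro h
        exact hvL (le_antisymm (hLmax v h) (hle L hLmem))
      have hcnt0 : p.count v = 0 := List.count_eq_zero.2 hvp
      have hbeq : ((some v == some L : Bool)) = false := by simp [hvL]
      have hS' : PySem.List.sorted (PySem.Set.ofList (p ++ [v])) (fun x => x) false
          = PySem.List.sorted (PySem.Set.ofList p) (fun x => x) false ++ [v] := by
        apply PySem.List.sorted_eq_of_perm_of_pairwise_lt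
        · rw [pv_ofList_append_not_mem hvp]
          exact (PySem.List.sorted_perm _ _ _).append_right _
        · rw [List.pairwise_append]
          refine ⟨PySem.List.sorted_ofList_pairwise_lt p, by simp, ?_⟩
          intro x hx y hy
          simp at hy; subst hy
          have hxp := hSsub x hx
          have hxv : x ≠ y := fun h => hvp (h ▸ hxp)
          have := hle x hxp
          omega
      have hcv : (((p ++ [v]).count v : Nat) : Int) = 1 := by
        rw [pv_cnt_self]; simp [hcnt0]
      have hfiltS : ∀ c : Int, (PySem.List.sorted (PySem.Set.ofList p) (fun x => x) false).filter
            (fun w => (((p ++ [v]).count w : Nat) : Int) == c)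
          = (PySem.List.sorted (PySem.Set.ofList p) (fun x => x) false).filter
            (fun w => ((p.count w : Nat) : Int) == c) := by
        intro c
        apply List.filter_congr
        intro x hx
        have hxv : x ≠ v := fun h => hvp (h ▸ hSsub x hx)
        rw [pv_cnt_ne p v x hxv]
      have hmodesC : ∀ c : Int, pvModesC (p ++ [v]) c
          = (PySem.List.sorted (PySem.Set.ofList p) (fun x => x) false).filter
              (fun w => ((p.count w : Nat) : Int) == c)
            ++ (if ((((p ++ [v]).count v : Nat) : Int) == c) then [v] else []) := by
        intro c
        rw [pvModesC, hS', List.filter_append, hfiltS, List.filter_singleton]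
        simp [Bool.cond_eq_ite]
      obtain ⟨⟨k, hk, hkb⟩, hbd⟩ := hbmax
      have hkv : k ≠ v := fun h => hvp (h ▸ hk)
      simp only [pvStepB, hbeq, Bool.false_eq_true, if_false]
      have hng : ¬ ((1 : Int) > b) := by omega
      rw [if_neg hng]
      split_ifs with h2
      · -- b = 1: v joins the modes
        have hb : (1 : Int) = b := by simpa using h2
        right
        dsimp only
        refine ⟨v, by simp, hle', rfl, hcv.symm, ?_, ?_⟩
        · apply pv_isMax_app
          · exact ⟨k, List.mem_append_left _ hk, by rw [pv_cnt_ne p v k hkv]; exact hkb⟩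
          · omega
          · exact fun k' hk' _ => hbd k' hk'
        · have hA : ((((p ++ [v]).count v : Nat) : Int) == b) = true := by
            simp only [beq_iff_eq]; omega
          rw [hmodesC b, hA, hmodes, pvModesC]
          simp
      · -- b > 1: nothing changes
        have hblt : (1 : Int) < b := by
          have : (1 : Int) ≠ b := by simpa using h2
          omega
        right
        dsimp only
        refine ⟨v, by simp, hle', rfl, hcv.symm, ?_, ?_⟩
        · apply pv_isMax_app
          · exact ⟨k, List.mem_append_left _ hk, by rw [pv_cnt_ne p v k hkv]; exact hkb⟩
          · omega
          · exact fun k' hk' _ => hbd k' hk'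
        · have hA : ((((p ++ [v]).count v : Nat) : Int) == b) = false := by
            simp only [beq_eq_false_iff_ne]; omega
          rw [hmodesC b, hA, hmodes, pvModesC]
          simp

lemma pv_foldl : ∀ (l p : List Int) (st : Option Int × Int × Int × List Int),
    (p ++ l).Pairwise (· ≤ ·) → PvInv p st → PvInv (p ++ l) (List.foldl pvStepB st l) := by
  intro l
  induction l with
  | nil => intro p st _ h; simpa using h
  | cons v l ih =>
    intro p st hpw hinv
    have hle : ∀ x ∈ p, x ≤ v := by
      have h := (List.pairwise_append.1 hpw).2.2
      intro x hx; exact h x hx v (by simp)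
    have h1 : PvInv (p ++ [v]) (pvStepB st v) := pv_step p v st hle hinv
    have hpw' : ((p ++ [v]) ++ l).Pairwise (· ≤ ·) := by simpa using hpw
    have := ih (p ++ [v]) (pvStepB st v) hpw' h1
    simpa using this

lemma pvIsMax_unique {xs : List Int} {m m' : Int} (h : PvIsMax xs m) (h' : PvIsMax xs m') : m = m' := by
  obtain ⟨⟨k, hk, hkm⟩, hb⟩ := h
  obtain ⟨⟨k', hk', hkm'⟩, hb'⟩ := h'
  have h1 := hb' k hk
  have h2 := hb k' hk'
  omega

lemma lemB (numbers : List Int) (hne : numbers ≠ []) (m : Int) (hm : PvIsMax numbers m) :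
    modefinder_alt numbers = pvPick (pvModesC numbers m) := by
  have hperm : (PySem.List.sorted numbers (fun x => x) false).Perm numbers :=
    PySem.List.sorted_perm _ _ _
  have hcount : ∀ w : Int, (PySem.List.sorted numbers (fun x => x) false).count w = numbers.count w :=
    fun w => hperm.count_eq w
  have hinv : PvInv (PySem.List.sorted numbers (fun x => x) false)
      ((PySem.List.sorted numbers (fun x => x) false).foldl pvStepB (none, 0, 0, [])) := by
    have := pv_foldl (PySem.List.sorted numbers (fun x => x) false) [] (none, 0, 0, [])
      (by simpa using PySem.List.sorted_pairwise numbers (fun x => x)) (Or.inl ⟨rfl, rfl⟩)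
    simpa using this
  rcases hinv with ⟨hnil, _⟩ | ⟨L, _, _, _, _, hbmax, hmodes⟩
  · exact absurd ((PySem.List.sorted_eq_nil_iff _ _ _).1 hnil) hne
  · have hbmax' : PvIsMax numbers ((PySem.List.sorted numbers (fun x => x) false).foldl pvStepB (none, 0, 0, [])).2.2.1 := by
      obtain ⟨⟨k, hk, hkb⟩, hbd⟩ := hbmax
      refine ⟨⟨k, hperm.mem_iff.1 hk, by rw [← hcount k]; exact hkb⟩, ?_⟩
      intro k' hk'
      have := hbd k' (hperm.mem_iff.2 hk')
      rw [hcount k'] at this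
      exact this
    have hbm : ((PySem.List.sorted numbers (fun x => x) false).foldl pvStepB (none, 0, 0, [])).2.2.1 = m :=
      pvIsMax_unique hbmax' hm
    have hsets : PySem.List.sorted (PySem.Set.ofList (PySem.List.sorted numbers (fun x => x) false)) (fun x => x) false
        = PySem.List.sorted (PySem.Set.ofList numbers) (fun x => x) false := by
      apply PySem.List.sorted_eq_sorted_of_perm _ _ _ (fun a b h => h)
      refine (List.perm_ext_iff_of_nodup (PySem.Set.nodup_ofList _) (PySem.Set.nodup_ofList _)).2 ?_
      intro a
      rw [PySem.Set.mem_ofList, PySem.Set.mem_ofList, hperm.mem_iff]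
    have hmodesEq : pvModesC (PySem.List.sorted numbers (fun x => x) false) m = pvModesC numbers m := by
      rw [pvModesC, pvModesC, hsets]
      apply List.filter_congr
      intro x _
      rw [hcount x]
    rw [hbm] at hmodes
    show pvPick (((PySem.List.sorted numbers (fun x => x) false).foldl pvStepB (none, 0, 0, [])).2.2.2) = _
    rw [hmodes, hmodesEq]

-- ===== VERDICT (by name: the statement is the Claim_ definition above) =====
theorem modefinder_spec : Claim_equal_modefinder := by
  intro numbers _ hpre
  unfold Spec_modefinder
  obtain ⟨m, hm, hA⟩ := lemA numbers hpre
  rw [hA, lemB numbers hpre m hm]
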